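-- pv_equiv track=rewrite | github.com/HeavMas/Algoritmz | Homeworkalgoritms2/prog5.py | stock
-- ===== SOURCE A (Python) =====
-- def stock(arr):
--     count = len(arr)
--     stack = []
--     for i in range(len(arr)):
--         if arr[i - 1] > arr[i] and arr[i - 1] - arr[i] == 1:
--             stack.append(arr[i - 1])
--             if len(stack) > 2:
--                 for i in range(len(stack)):
--                     count += 1
--         else:
--             stack.clear()
--     return count
-- ===== SOURCE B (Python) =====
-- def _flush(count, run):
--     # closed form for the additions A makes over a finished run: 3+4+...+run
--     if run >= 3:
--         count += run * (run + 1) // 2 - 3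
--     return count
--
-- def stock(arr):
--     n = len(arr)
--     # per-index "hit" mask: does this step continue a decreasing-by-1 chain
--     # (arr[-1] wrap-around at i == 0 kept, as in the original)
--     hits = [arr[i - 1] > arr[i] and arr[i - 1] - arr[i] == 1 for i in range(n)]
--     count = n
--     run = 0
--     for h in hits:
--         if h:
--             run += 1
--         else:
--             count = _flush(count, run)
--             run = 0
--     return _flush(count, run)
-- ===== Notes on version B (the rewrite author's own statement) =====
-- stated objective: alternative
-- what changed: Replaces A's stack (whose contents are never read) and its per-step inner recount loop with a boolean hit mask scanned once, adding the closed form run*(run+1)//2 - 3 per maximal run of length >= 3; A's re-count is quadratic in the run length, B's closed form is constant per run, though on typical inputs (short runs) the costs are similar.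
import Mathlib
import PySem

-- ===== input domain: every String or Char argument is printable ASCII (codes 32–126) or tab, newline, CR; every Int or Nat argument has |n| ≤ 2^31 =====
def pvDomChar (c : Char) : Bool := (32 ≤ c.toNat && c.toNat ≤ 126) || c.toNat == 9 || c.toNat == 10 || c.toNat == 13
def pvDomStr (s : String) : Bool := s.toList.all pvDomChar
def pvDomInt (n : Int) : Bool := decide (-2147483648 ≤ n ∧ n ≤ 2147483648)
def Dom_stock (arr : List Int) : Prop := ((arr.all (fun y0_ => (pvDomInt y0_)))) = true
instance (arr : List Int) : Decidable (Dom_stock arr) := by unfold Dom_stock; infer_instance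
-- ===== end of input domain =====

-- B replaces A's stack-and-recount loop by one pass over a boolean hit mask with a
-- closed-form bonus per maximal run (alternative algorithm, similar cost on typical inputs).

-- ===== PORT A =====
-- the body of A's for-loop (state = (count, stack)); indices are always in range
-- (i ∈ range(len(arr)), and i-1 = -1 wraps to the last element), so pyGetD's
-- default is never used
def pvStepFull (arr : List Int) (st : Int × List Int) (i : Int) : Int × List Int :=
  if (PySem.List.pyGetD arr (i - 1) 0 > PySem.List.pyGetD arr i 0) &&
     (PySem.List.pyGetD arr (i - 1) 0 - PySem.List.pyGetD arr i 0 == 1) then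
    if (st.2 ++ [PySem.List.pyGetD arr (i - 1) 0]).length > 2 then
      ((PySem.List.pyRange 0 (st.2 ++ [PySem.List.pyGetD arr (i - 1) 0]).length 1).foldl
          (fun c _ => c + 1) st.1,
       st.2 ++ [PySem.List.pyGetD arr (i - 1) 0])
    else (st.1, st.2 ++ [PySem.List.pyGetD arr (i - 1) 0])
  else (st.1, [])

def stock (arr : List Int) : Int :=
  ((PySem.List.pyRange 0 arr.length 1).foldl (pvStepFull arr)
    ((arr.length : Int), ([] : List Int))).1

-- ===== PORT B =====
-- the hit test of Source B's mask comprehension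
def pvHit (arr : List Int) (i : Int) : Bool :=
  (PySem.List.pyGetD arr (i - 1) 0 > PySem.List.pyGetD arr i 0) &&
  (PySem.List.pyGetD arr (i - 1) 0 - PySem.List.pyGetD arr i 0 == 1)

-- _flush(count, run) of Source B
def pvFinish (st : Int × Int) : Int :=
  if st.2 ≥ 3 then st.1 + PySem.Int.floordiv (st.2 * (st.2 + 1)) 2 - 3 else st.1

def stock_alt (arr : List Int) : Int :=
  pvFinish
    (((PySem.List.pyRange 0 arr.length 1).map (pvHit arr)).foldl
      (fun (st : Int × Int) h => if h then (st.1, st.2 + 1) else (pvFinish st, 0))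
      ((arr.length : Int), 0))

-- ===== PRECONDITION & SPEC =====
def Spec_stock (arr : List Int) (out : Int) : Prop := out = stock_alt arr
instance (arr : List Int) (out : Int) : Decidable (Spec_stock arr out) := by unfold Spec_stock; infer_instance

-- ===== CLAIM (what is proved, stated in full; the proofs are below) =====
def Claim_equal_stock : Prop := ∀ (arr : List Int), Dom_stock arr → Spec_stock arr (stock arr)

-- ===== LEMMAS AND PROOFS =====

-- the run bonus 3+4+…+r accumulated by A once the run length exceeds 2
def pvBonus (r : Int) : Int :=
  if r ≥ 3 then PySem.Int.floordiv (r * (r + 1)) 2 - 3 else 0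

lemma pvFinish_eq (c r : Int) : pvFinish (c, r) = c + pvBonus r := by
  unfold pvFinish pvBonus; dsimp only; split_ifs <;> omega

lemma pvBonus_zero : pvBonus 0 = 0 := by decide

lemma pvBonus_succ (k : Nat) :
    pvBonus ((k : Int) + 1)
      = pvBonus (k : Int) + (if k + 1 > 2 then ((k : Int) + 1) else 0) := by
  unfold pvBonus
  rcases Nat.lt_or_ge k 3 with h | h
  · interval_cases k <;> decide
  · have c1 : ((k : Int) + 1) ≥ 3 := by omega
    have c2 : ((k : Int)) ≥ 3 := by omega
    rw [if_pos c1, if_pos c2, if_pos (by omega : k + 1 > 2),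
        PySem.Int.floordiv_eq_ediv_of_pos (by norm_num),
        PySem.Int.floordiv_eq_ediv_of_pos (by norm_num),
        show ((k : Int) + 1) * ((k : Int) + 1 + 1)
            = (k : Int) * ((k : Int) + 1) + ((k : Int) + 1) * 2 by ring,
        Int.add_mul_ediv_right _ _ (by norm_num)]
    omega

-- A's inner counting loop adds the stack length
lemma pvInner (m : Nat) (c : Int) :
    (PySem.List.pyRange 0 (m : Int) 1).foldl (fun c _ => c + 1) c = c + m := by
  induction m generalizing c with
  | zero => simp [PySem.List.pyRange_one_eq_nil]
  | succ m ih =>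
      push_cast
      rw [PySem.List.pyRange_one_succ_right (by positivity), List.foldl_append]
      simp only [List.foldl_cons, List.foldl_nil, ih]
      ring

-- the three shapes of A's step
lemma pvStepFull_hit_big (arr : List Int) (c : Int) (stack : List Int) (i : Int)
    (hc : pvHit arr i = true) (h2 : stack.length + 1 > 2) :
    pvStepFull arr (c, stack) i
      = (c + ((stack.length : Int) + 1), stack ++ [PySem.List.pyGetD arr (i - 1) 0]) := by
  unfold pvStepFull
  unfold pvHit at hc
  rw [if_pos hc, if_pos (by simpa using h2)]
  simp only [List.length_append, List.length_singleton]
  rw [pvInner]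
  push_cast; ring_nf

lemma pvStepFull_hit_small (arr : List Int) (c : Int) (stack : List Int) (i : Int)
    (hc : pvHit arr i = true) (h2 : ¬ stack.length + 1 > 2) :
    pvStepFull arr (c, stack) i = (c, stack ++ [PySem.List.pyGetD arr (i - 1) 0]) := by
  unfold pvStepFull
  unfold pvHit at hc
  rw [if_pos hc, if_neg (by simpa using h2)]

lemma pvStepFull_miss (arr : List Int) (c : Int) (stack : List Int) (i : Int)
    (hc : pvHit arr i = false) :
    pvStepFull arr (c, stack) i = (c, []) := by
  unfold pvStepFull
  unfold pvHit at hc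
  rw [if_neg (by simp [hc])]

-- abstraction of A's loop state: only the count and the stack LENGTH matter
def pvStepA (st : Int × Nat) (h : Bool) : Int × Nat :=
  if h then (if st.2 + 1 > 2 then st.1 + ((st.2 : Int) + 1) else st.1, st.2 + 1)
  else (st.1, 0)

-- A's fold over any index list equals the abstract fold over the hit values
lemma pvAbs (arr : List Int) (l : List Int) (c : Int) (stack : List Int) :
    (l.foldl (pvStepFull arr) (c, stack)).1
    = ((l.map (pvHit arr)).foldl pvStepA (c, stack.length)).1 := by
  induction l generalizing c stack with
  | nil => rfl
  | cons i l ih =>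
      simp only [List.foldl_cons, List.map_cons]
      cases hc : pvHit arr i with
      | true =>
          by_cases h2 : stack.length + 1 > 2
          · rw [pvStepFull_hit_big arr c stack i hc h2, ih]
            simp only [pvStepA, if_true, List.length_append,
              List.length_singleton, if_pos h2]
          · rw [pvStepFull_hit_small arr c stack i hc h2, ih]
            simp only [pvStepA, if_true, List.length_append,
              List.length_singleton, if_neg h2]
      | false =>
          rw [pvStepFull_miss arr c stack i hc, ih]
          simp only [pvStepA, Bool.false_eq_true, if_false, List.length_nil]

-- B's deferred closed form agrees with A's incremental additions
lemma pvRuns (hs : List Bool) (c : Int) (k : Nat) :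
    (hs.foldl pvStepA (c + pvBonus (k : Int), k)).1
    = pvFinish (hs.foldl
        (fun (st : Int × Int) h => if h then (st.1, st.2 + 1) else (pvFinish st, 0))
        (c, (k : Int))) := by
  induction hs generalizing c k with
  | nil => simp [pvFinish_eq]
  | cons h hs ih =>
      cases h with
      | true =>
          simp only [List.foldl_cons, pvStepA, if_true]
          have hb := pvBonus_succ k
          have hih := ih c (k + 1)
          push_cast at hih
          rw [← hih,
            show (if k + 1 > 2 then c + pvBonus (k : Int) + ((k : Int) + 1)
                  else c + pvBonus (k : Int)) = c + pvBonus ((k : Int) + 1) by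
              rw [hb]; split_ifs <;> ring]
      | false =>
          simp only [List.foldl_cons, pvStepA, Bool.false_eq_true, if_false]
          have hih := ih (c + pvBonus (k : Int)) 0
          simp only [Nat.cast_zero, pvBonus_zero, add_zero] at hih
          rw [pvFinish_eq c (k : Int)]
          exact hih

-- ===== VERDICT (by name: the statement is the Claim_ definition above) =====
theorem stock_spec : Claim_equal_stock := by
  intro arr _
  unfold Spec_stock stock stock_alt
  rw [pvAbs]
  have := pvRuns ((PySem.List.pyRange 0 arr.length 1).map (pvHit arr))
    ((arr.length : Int)) 0
  simpa [pvBonus_zero] using this
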